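-- pv_equiv track=rewrite | github.com/xwooh/leetcode | py/hw/bh10.py | calc
-- ===== SOURCE A (Python) =====
-- def calc(infos: list[str]) -> bool:
--     absent_count = 0
--     is_pre_late = False
--     err_count = 0
--
--     count = 0
--     for info in infos:
--         count += 1
--         if info == "absent":
--             if absent_count > 1:
--                 return False
--             absent_count += 1
--             err_count += 1
--             is_pre_late = False
--         elif info in {"late", "leaveearly"}:
--             if is_pre_late:
--                 return False
--             err_count += 1
--             is_pre_late = True
--         elif info == "present":
--             is_pre_late = False
--
--         if count == 7:
--             if err_count >= 3:
--                 return False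
--             err_count = 0
--
--     return True
-- ===== SOURCE B (Python) =====
-- def calc(infos: list[str]) -> bool:
--     if infos.count("absent") >= 3:
--         return False
--     prev_late = False
--     for x in infos:
--         if x in ("late", "leaveearly"):
--             if prev_late:
--                 return False
--             prev_late = True
--         elif x in ("absent", "present"):
--             prev_late = False
--     if len(infos) >= 7 and sum(1 for x in infos[:7] if x in ("absent", "late", "leaveearly")) >= 3:
--         return False
--     return True
-- ===== Notes on version B (the rewrite author's own statement) =====
-- stated objective: simpler
-- what changed: Replaces the single four-variable stateful loop with three independent rule checks (total absent count, one flag-only scan for consecutive late/leaveearly, and a count over the first seven entries), OR-ed into the verdict.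
import Mathlib
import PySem

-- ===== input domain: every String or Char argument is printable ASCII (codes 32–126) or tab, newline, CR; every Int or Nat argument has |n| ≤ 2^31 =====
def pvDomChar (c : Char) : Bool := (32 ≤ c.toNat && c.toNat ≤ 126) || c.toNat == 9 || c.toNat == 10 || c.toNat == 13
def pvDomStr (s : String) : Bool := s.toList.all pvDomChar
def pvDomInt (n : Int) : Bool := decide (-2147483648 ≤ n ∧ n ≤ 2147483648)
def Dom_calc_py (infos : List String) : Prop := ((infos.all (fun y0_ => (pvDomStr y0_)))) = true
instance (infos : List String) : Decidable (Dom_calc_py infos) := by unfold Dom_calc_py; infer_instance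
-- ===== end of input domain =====

-- B is a simpler decomposition of A into three independent rule checks; return values agree everywhere.

-- ===== PORT A =====
-- the for-loop of A, state (absent_count, is_pre_late, err_count, count)
def calcGo : List String → Int → Bool → Int → Int → Bool
  | [], _, _, _, _ => true
  | info :: rest, absentCount, isPreLate, errCount, count =>
    let count := count + 1
    let st : Option (Int × Bool × Int) :=
      if info == "absent" then
        if absentCount > 1 then none
        else some (absentCount + 1, false, errCount + 1)
      else if info == "late" || info == "leaveearly" then
        if isPreLate then none
        else some (absentCount, true, errCount + 1)
      else if info == "present" then
        some (absentCount, false, errCount)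
      else
        some (absentCount, isPreLate, errCount)
    match st with
    | none => false
    | some (a, p, e) =>
      if count == 7 then
        if e ≥ 3 then false else calcGo rest a p 0 count
      else calcGo rest a p e count

def calc_py (infos : List String) : Bool :=
  calcGo infos 0 false 0 0

-- ===== PORT B =====
-- B's one scan with the prev_late flag
def altLate : List String → Bool → Bool
  | [], _ => true
  | x :: rest, prev =>
    if x == "late" || x == "leaveearly" then
      if prev then false else altLate rest true
    else if x == "absent" || x == "present" then altLate rest false
    else altLate rest prev

def errTok (x : String) : Bool := x == "absent" || x == "late" || x == "leaveearly"

def calc_py_alt (infos : List String) : Bool :=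
  if 3 ≤ PySem.List.count infos "absent" then false
  else if altLate infos false = false then false
  else if 7 ≤ infos.length ∧ 3 ≤ ((infos.take 7).filter errTok).length then false
  else true

-- ===== PRECONDITION & SPEC =====
def Spec_calc_py (infos : List String) (out : Bool) : Prop := out = calc_py_alt infos
instance (infos : List String) (out : Bool) : Decidable (Spec_calc_py infos out) := by unfold Spec_calc_py; infer_instance

-- ===== CLAIM (what is proved, stated in full; the proofs are below) =====
def Claim_equal_calc_py : Prop := ∀ (infos : List String), Dom_calc_py infos → Spec_calc_py infos (calc_py infos)

-- ===== LEMMAS AND PROOFS =====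

-- the three independent factors of A's loop
def absentOK : List String → Int → Bool
  | [], _ => true
  | x :: rest, a =>
    if x == "absent" then (if a > 1 then false else absentOK rest (a + 1))
    else absentOK rest a

def windowOK : List String → Int → Int → Bool
  | [], _, _ => true
  | x :: rest, e, c =>
    let c := c + 1
    let e := if errTok x then e + 1 else e
    if c == 7 then (if e ≥ 3 then false else windowOK rest 0 c)
    else windowOK rest e c

theorem calcGo_factor (l : List String) : ∀ a p e c,
    calcGo l a p e c = (absentOK l a && altLate l p && windowOK l e c) := by
  induction l with
  | nil => intro a p e c; simp [calcGo, absentOK, altLate, windowOK]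
  | cons x rest ih =>
    intro a p e c
    by_cases hab : x = "absent"
    · subst hab
      simp only [calcGo, absentOK, altLate, windowOK, errTok, beq_self_eq_true,
        Bool.true_or, Bool.or_true, if_pos, reduceIte]
      split_ifs <;> simp_all [ih]
    · by_cases hl : x = "late" ∨ x = "leaveearly"
      · have hx : (x == "late" || x == "leaveearly") = true := by
          rcases hl with h | h <;> simp [h]
        have hxa : (x == "absent") = false := by simp [hab]
        have hxe : errTok x = true := by simp [errTok, hxa, hx]
        simp only [calcGo, absentOK, altLate, windowOK, hxe, hxa, hx,
          Bool.false_eq_true, if_false, if_true]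
        split_ifs <;> simp_all [ih]
      · rw [not_or] at hl
        have hxa : (x == "absent") = false := by simp [hab]
        have hx : (x == "late" || x == "leaveearly") = false := by
          simp [hl.1, hl.2]
        have hxe : errTok x = false := by simp [errTok, hxa, hx]
        by_cases hpr : x = "present"
        · subst hpr
          simp only [calcGo, absentOK, altLate, windowOK, hxe, hxa, hx,
            beq_self_eq_true, Bool.or_true, Bool.false_eq_true, if_false, if_true]
          split_ifs <;> simp_all [ih]
        · have hxp : (x == "present") = false := by simp [hpr]
          simp only [calcGo, absentOK, altLate, windowOK, hxe, hxa, hx, hxp,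
            Bool.or_false, Bool.false_eq_true, if_false]
          split_ifs <;> first | rw [ih] | simp_all [ih]

theorem absentOK_count (l : List String) : ∀ a : Int, 0 ≤ a → a ≤ 2 →
    absentOK l a = decide (a + (l.count "absent" : Int) ≤ 2) := by
  induction l with
  | nil => intro a _ h2; simp [absentOK]; omega
  | cons x rest ih =>
    intro a ha h2
    by_cases hx : x = "absent"
    · subst hx
      simp only [absentOK, beq_self_eq_true, if_pos]
      by_cases h1 : a > 1
      · have hcnt : 1 ≤ (("absent" :: rest).count "absent") := by
          simp [List.count_cons]
        have : ¬ (a + ((("absent" :: rest).count "absent" : Nat) : Int) ≤ 2) := by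
          push_cast at *; omega
        simp only [this, decide_false, if_pos h1]
      · rw [if_neg h1, ih (a + 1) (by omega) (by omega)]
        simp only [List.count_cons, beq_self_eq_true, if_pos, decide_eq_decide]
        push_cast; constructor <;> (intro h; omega)
    · have hxa : (x == "absent") = false := by simp [hx]
      simp only [absentOK, hxa, if_neg Bool.false_ne_true]
      rw [ih a ha h2]
      simp [List.count_cons, hx]

theorem windowOK_big (l : List String) : ∀ e c : Int, 7 ≤ c → windowOK l e c = true := by
  induction l with
  | nil => intro e c _; simp [windowOK]
  | cons x rest ih =>
    intro e c hc
    have h7 : (c + 1 == 7) = false := by simp; omega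
    simp only [windowOK, h7]
    simp only [if_neg Bool.false_ne_true]
    exact ih _ _ (by omega)

theorem windowOK_char (l : List String) : ∀ e c : Int, 0 ≤ c → c < 7 →
    windowOK l e c =
      decide (¬ (7 ≤ c + (l.length : Int) ∧
        3 ≤ e + (((l.take (7 - c).toNat).filter errTok).length : Int))) := by
  induction l with
  | nil => intro e c _ _; simp [windowOK]; omega
  | cons x rest ih =>
    intro e c hc0 hc7
    by_cases h7 : c + 1 = 7
    · have hc6 : c = 6 := by omega
      subst hc6
      have htk : ((7:Int) - 6).toNat = 1 := by decide
      have htake : List.take 1 (x :: rest) = [x] := by simp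
      by_cases hx : errTok x = true
      · by_cases h3 : 3 ≤ e + 1
        · have hP : (7 ≤ 6 + ((x :: rest).length : Int) ∧
              3 ≤ e + ((((x :: rest).take ((7:Int) - 6).toNat).filter errTok).length : Int)) := by
            refine ⟨by simp [List.length_cons]; push_cast; omega, ?_⟩
            rw [htk, htake]; simp [List.filter, hx]; omega
          simp [windowOK, hx, h3, hP] <;> (push_cast; omega)
        · have hP : ¬ (7 ≤ 6 + ((x :: rest).length : Int) ∧
              3 ≤ e + ((((x :: rest).take ((7:Int) - 6).toNat).filter errTok).length : Int)) := by
            rw [htk, htake]; rintro ⟨-, h⟩; simp [List.filter, hx] at h; omega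
          simp [windowOK, hx, h3, hP, windowOK_big rest 0 7 (by omega)]
      · have hx' : errTok x = false := by simpa using hx
        by_cases h3 : 3 ≤ e
        · have hP : (7 ≤ 6 + ((x :: rest).length : Int) ∧
              3 ≤ e + ((((x :: rest).take ((7:Int) - 6).toNat).filter errTok).length : Int)) := by
            refine ⟨by simp [List.length_cons]; push_cast; omega, ?_⟩
            rw [htk, htake]; simp [List.filter, hx']; omega
          simp [windowOK, hx', h3, hP] <;> (push_cast; omega)
        · have hP : ¬ (7 ≤ 6 + ((x :: rest).length : Int) ∧
              3 ≤ e + ((((x :: rest).take ((7:Int) - 6).toNat).filter errTok).length : Int)) := by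
            rw [htk, htake]; rintro ⟨-, h⟩; simp [List.filter, hx'] at h; omega
          simp [windowOK, hx', h3, hP, windowOK_big rest 0 7 (by omega)]
    · have hne : (c + 1 == 7) = false := by simp; omega
      have htk : ((7:Int) - c).toNat = ((7:Int) - (c + 1)).toNat + 1 := by omega
      simp only [windowOK, hne]
      simp only [if_neg Bool.false_ne_true]
      rw [ih _ (c + 1) (by omega) (by omega), htk]
      simp only [List.take_succ_cons, decide_eq_decide, List.filter_cons, List.length_cons]
      by_cases hx : errTok x = true <;> simp [hx] <;> push_cast <;> omega

-- ===== VERDICT (by name: the statement is the Claim_ definition above) =====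
theorem calc_py_spec : Claim_equal_calc_py := by
  intro infos _
  unfold Spec_calc_py calc_py calc_py_alt
  rw [calcGo_factor, absentOK_count infos 0 le_rfl (by omega),
    windowOK_char infos 0 0 le_rfl (by omega), PySem.List.count_eq]
  have htk : ((7:Int) - 0).toNat = 7 := by decide
  rw [htk]
  by_cases h1 : 3 ≤ infos.count "absent"
  · have : ¬ ((0:Int) + (infos.count "absent" : Int) ≤ 2) := by push_cast; omega
    simp [this, h1]
    intro h
    exact absurd h (by omega)
  · have : ((0:Int) + (infos.count "absent" : Int) ≤ 2) := by push_cast; omega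
    simp only [this, decide_true, Bool.true_and, if_neg h1]
    by_cases h2 : altLate infos false = false
    · simp [h2]
    · have h2' : altLate infos false = true := by
        cases h : altLate infos false <;> simp_all
      simp only [h2', if_neg (by simp : ¬ (true = false))]
      by_cases h3 : 7 ≤ infos.length ∧ 3 ≤ ((infos.take 7).filter errTok).length
      · have : (7 ≤ (0:Int) + (infos.length : Int) ∧
            3 ≤ (0:Int) + (((infos.take 7).filter errTok).length : Int)) := by
          constructor <;> (push_cast; omega)
        simp [h3, this]
      · have : ¬ (7 ≤ (0:Int) + (infos.length : Int) ∧
            3 ≤ (0:Int) + (((infos.take 7).filter errTok).length : Int)) := by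
          intro ⟨ha, hb⟩; exact h3 ⟨by push_cast at ha; omega, by push_cast at hb; omega⟩
        simp [h3, this]
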